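-- pv_equiv track=rewrite | github.com/bjpl/learn_bash_from_session_data | tests/test_analyzer.py | calculate_complexity_distribution
-- ===== SOURCE A (Python) =====
-- def calculate_complexity_distribution(complexities):
--     """Calculate distribution of complexity levels."""
--     distribution = {"beginner": 0, "intermediate": 0, "advanced": 0}
--     for score in complexities:
--         if score <= 2:
--             distribution["beginner"] += 1
--         elif score <= 5:
--             distribution["intermediate"] += 1
--         else:
--             distribution["advanced"] += 1
--     return distribution
-- ===== SOURCE B (Python) =====
-- def calculate_complexity_distribution(complexities):
--     """Calculate distribution of complexity levels (three independent counting passes)."""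
--     beginner = sum(1 for s in complexities if s <= 2)
--     intermediate = sum(1 for s in complexities if 2 < s <= 5)
--     advanced = sum(1 for s in complexities if s > 5)
--     return {"beginner": beginner, "intermediate": intermediate, "advanced": advanced}
-- ===== Notes on version B (the rewrite author's own statement) =====
-- stated objective: simpler
-- what changed: Replaced the single stateful branching pass that increments dict entries with three independent counting passes (one generator-sum per band) followed by one dict literal.
import Mathlib
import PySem

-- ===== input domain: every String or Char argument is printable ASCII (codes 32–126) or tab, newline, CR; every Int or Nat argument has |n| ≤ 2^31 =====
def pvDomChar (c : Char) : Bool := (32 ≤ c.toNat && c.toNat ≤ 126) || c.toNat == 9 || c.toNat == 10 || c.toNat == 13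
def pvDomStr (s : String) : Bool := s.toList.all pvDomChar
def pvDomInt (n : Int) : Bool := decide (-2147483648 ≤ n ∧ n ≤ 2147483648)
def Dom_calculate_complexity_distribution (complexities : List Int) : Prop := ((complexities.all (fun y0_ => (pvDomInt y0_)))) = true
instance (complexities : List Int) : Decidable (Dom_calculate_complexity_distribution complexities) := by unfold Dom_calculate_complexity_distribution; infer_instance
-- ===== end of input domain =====

-- B replaces A's single branching pass over a mutable dict with three independent counting passes; objective: simpler.


-- ===== PORT A =====
-- fold over the list, incrementing the matching entry of the insertion-ordered dict
def calculate_complexity_distribution (complexities : List Int) : List (String × Int) :=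
  let d0 : PySem.Dict String Int :=
    PySem.Dict.ofList [("beginner", 0), ("intermediate", 0), ("advanced", 0)]
  (complexities.foldl (fun d score =>
      if score ≤ 2 then d.modify "beginner" 0 (· + 1)
      else if score ≤ 5 then d.modify "intermediate" 0 (· + 1)
      else d.modify "advanced" 0 (· + 1)) d0).items

-- ===== PORT B =====
-- three independent counting passes, then one literal dict
def calculate_complexity_distribution_alt (complexities : List Int) : List (String × Int) :=
  let beginner : Int := ((complexities.filter (fun s => s ≤ 2)).map (fun _ => (1 : Int))).sum
  let intermediate : Int := ((complexities.filter (fun s => 2 < s ∧ s ≤ 5)).map (fun _ => (1 : Int))).sum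
  let advanced : Int := ((complexities.filter (fun s => 5 < s)).map (fun _ => (1 : Int))).sum
  [("beginner", beginner), ("intermediate", intermediate), ("advanced", advanced)]

-- ===== PRECONDITION & SPEC =====
def Spec_calculate_complexity_distribution (complexities : List Int) (out : List (String × Int)) : Prop := out = calculate_complexity_distribution_alt complexities
instance (complexities : List Int) (out : List (String × Int)) : Decidable (Spec_calculate_complexity_distribution complexities out) := by unfold Spec_calculate_complexity_distribution; infer_instance

-- ===== CLAIM (what is proved, stated in full; the proofs are below) =====
def Claim_equal_calculate_complexity_distribution : Prop := ∀ (complexities : List Int), Dom_calculate_complexity_distribution complexities → Spec_calculate_complexity_distribution complexities (calculate_complexity_distribution complexities)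

-- ===== LEMMAS AND PROOFS =====

-- invariant of A's loop: starting from any dict literal with the three keys, the items of the
-- fold are the starting counts plus B's three per-band counts.
theorem pv_loop (xs : List Int) (b i a : Int) :
    ((xs.foldl (fun d score =>
        if score ≤ 2 then d.modify "beginner" 0 (· + 1)
        else if score ≤ 5 then d.modify "intermediate" 0 (· + 1)
        else d.modify "advanced" 0 (· + 1))
      (PySem.Dict.mk [("beginner", b), ("intermediate", i), ("advanced", a)])).items)
    = [("beginner", b + ((xs.filter (fun s => s ≤ 2)).map (fun _ => (1 : Int))).sum),
       ("intermediate", i + ((xs.filter (fun s => 2 < s ∧ s ≤ 5)).map (fun _ => (1 : Int))).sum),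
       ("advanced", a + ((xs.filter (fun s => 5 < s)).map (fun _ => (1 : Int))).sum)] := by
  induction xs generalizing b i a with
  | nil => simp
  | cons x xs ih =>
    have hb : (PySem.Dict.mk [("beginner", b), ("intermediate", i), ("advanced", a)]).modify "beginner" 0 (· + 1)
        = PySem.Dict.mk [("beginner", b + 1), ("intermediate", i), ("advanced", a)] := rfl
    have hi : (PySem.Dict.mk [("beginner", b), ("intermediate", i), ("advanced", a)]).modify "intermediate" 0 (· + 1)
        = PySem.Dict.mk [("beginner", b), ("intermediate", i + 1), ("advanced", a)] := rfl
    have ha : (PySem.Dict.mk [("beginner", b), ("intermediate", i), ("advanced", a)]).modify "advanced" 0 (· + 1)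
        = PySem.Dict.mk [("beginner", b), ("intermediate", i), ("advanced", a + 1)] := rfl
    by_cases h2 : x ≤ 2
    · rw [List.foldl_cons, if_pos h2, hb, ih]
      simp only [List.filter_cons]
      simp [h2, add_assoc, add_comm]
      exact ⟨by rw [if_neg (by omega : ¬ (2 < x ∧ x ≤ 5))], by rw [if_neg (by omega : ¬ (5 < x))]⟩
    · by_cases h5 : x ≤ 5
      · rw [List.foldl_cons, if_neg h2, if_pos h5, hi, ih]
        simp only [List.filter_cons]
        simp [h2, (show 2 < x ∧ x ≤ 5 by omega), add_assoc, add_comm]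
        rw [if_neg (by omega : ¬ (5 < x))]
      · rw [List.foldl_cons, if_neg h2, if_neg h5, ha, ih]
        simp only [List.filter_cons]
        simp [h2, (show 5 < x by omega), add_assoc, add_comm]
        rw [if_neg (by omega : ¬ (2 < x ∧ x ≤ 5))]

-- ===== VERDICT (by name: the statement is the Claim_ definition above) =====
theorem calculate_complexity_distribution_spec : Claim_equal_calculate_complexity_distribution := by
  intro xs _
  unfold Spec_calculate_complexity_distribution
  unfold calculate_complexity_distribution calculate_complexity_distribution_alt
  have h0 : (PySem.Dict.ofList [("beginner", (0:Int)), ("intermediate", 0), ("advanced", 0)])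
      = PySem.Dict.mk [("beginner", 0), ("intermediate", 0), ("advanced", 0)] := by decide
  simp only [h0, pv_loop, zero_add]
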